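-- pv_equiv track=rewrite | github.com/dumpamanojreddy/autonomous_navigation | src/Bresenham.py | thicken
-- ===== SOURCE A (Python) =====
-- import copy
--
-- def thicken(line, thickness, left=True):
--     if thickness > 0:
--         new_line = copy.deepcopy(line)
--         for cell in line:
--             (x, y) = cell
--             new_cell = (x + (-1 if left else 1), y)
--             if new_cell not in new_line:
--                 new_line.append(new_cell)
--
--         return thicken(new_line, thickness - 1, not left)
--
--     else:
--         return line
-- ===== SOURCE B (Python) =====
-- def thicken(line, thickness, left=True):
--     current = list(line)
--     direction = left
--     while thickness > 0:
--         shift = -1 if direction else 1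
--         shifted = [(x + shift, y) for (x, y) in current]
--         uniq = list(dict.fromkeys(shifted))
--         current = current + [c for c in uniq if c not in current]
--         direction = not direction
--         thickness -= 1
--     return current
-- ===== Notes on version B (the rewrite author's own statement) =====
-- stated objective: alternative
-- what changed: Replaces A's tail recursion on thickness with an explicit while-loop, and builds each layer's new cells in two phases (dedup the shifted snapshot, then filter against the current list) instead of A's membership test against a growing result list.
import Mathlib
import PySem

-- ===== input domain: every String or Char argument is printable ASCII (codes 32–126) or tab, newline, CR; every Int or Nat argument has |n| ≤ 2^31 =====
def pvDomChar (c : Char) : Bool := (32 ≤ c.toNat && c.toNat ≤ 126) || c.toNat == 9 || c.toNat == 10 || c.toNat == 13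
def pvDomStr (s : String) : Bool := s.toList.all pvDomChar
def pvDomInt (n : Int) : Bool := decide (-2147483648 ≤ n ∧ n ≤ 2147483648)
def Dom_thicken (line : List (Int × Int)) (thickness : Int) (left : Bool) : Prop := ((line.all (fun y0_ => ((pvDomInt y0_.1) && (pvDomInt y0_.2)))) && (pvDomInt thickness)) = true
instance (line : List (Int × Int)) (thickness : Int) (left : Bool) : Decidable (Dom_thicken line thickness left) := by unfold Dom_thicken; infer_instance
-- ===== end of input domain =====

-- B replaces A's recursion with an explicit while-loop and builds each layer's new cells
-- in two phases (dedup the shifted snapshot, then filter against the current list) instead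
-- of testing membership against a growing list; objective: alternative decomposition.

-- ===== PORT A =====
-- A: if thickness > 0, grow new_line by appending each shifted cell not already present,
-- then recurse with thickness-1 and flipped direction.
def thicken (line : List (Int × Int)) (thickness : Int) (left : Bool) : List (Int × Int) :=
  if thickness > 0 then
    let new_line := line.foldl (fun nl cell =>
      let new_cell : Int × Int := (cell.1 + (if left then -1 else 1), cell.2)
      if new_cell ∈ nl then nl else nl ++ [new_cell]) line
    thicken new_line (thickness - 1) (!left)
  else
    line
termination_by thickness.toNat
decreasing_by omega

-- ===== PORT B =====
-- list(dict.fromkeys(shifted)): keep the first occurrence of each element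
def pyDedup (seen : List (Int × Int)) : List (Int × Int) → List (Int × Int)
  | [] => []
  | y :: ys => if y ∈ seen then pyDedup seen ys else y :: pyDedup (y :: seen) ys

-- one iteration of B's while body: shift the snapshot, dedup it, append the new ones
def stepB (cur : List (Int × Int)) (dir : Bool) : List (Int × Int) :=
  let shifted := cur.map (fun c => (c.1 + (if dir then -1 else 1), c.2))
  let uniq := pyDedup [] shifted
  cur ++ uniq.filter (fun c => decide (c ∉ cur))

-- the while-loop: fuel = number of remaining iterations (thickness.toNat)
def loopB : Nat → List (Int × Int) → Bool → List (Int × Int)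
  | 0, cur, _ => cur
  | n + 1, cur, dir => loopB n (stepB cur dir) (!dir)

def thicken_alt (line : List (Int × Int)) (thickness : Int) (left : Bool) : List (Int × Int) :=
  loopB thickness.toNat line left

-- ===== PRECONDITION & SPEC =====
def Spec_thicken (line : List (Int × Int)) (thickness : Int) (left : Bool) (out : List (Int × Int)) : Prop := out = thicken_alt line thickness left
instance (line : List (Int × Int)) (thickness : Int) (left : Bool) (out : List (Int × Int)) : Decidable (Spec_thicken line thickness left out) := by unfold Spec_thicken; infer_instance

-- ===== CLAIM (what is proved, stated in full; the proofs are below) =====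
def Claim_equal_thicken : Prop := ∀ (line : List (Int × Int)) (thickness : Int) (left : Bool), Dom_thicken line thickness left → Spec_thicken line thickness left (thicken line thickness left)

-- ===== LEMMAS AND PROOFS =====

-- the extras appended by A's growing-membership loop, relative to accumulator acc
def extras (acc : List (Int × Int)) : List (Int × Int) → List (Int × Int)
  | [] => []
  | y :: ys => if y ∈ acc then extras acc ys else y :: extras (acc ++ [y]) ys

theorem foldl_grow_eq_extras (f : (Int × Int) → (Int × Int)) :
    ∀ (l acc : List (Int × Int)),
      l.foldl (fun nl cell => if f cell ∈ nl then nl else nl ++ [f cell]) acc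
        = acc ++ extras acc (l.map f) := by
  intro l
  induction l with
  | nil => intro acc; simp [extras]
  | cons c l ih =>
    intro acc
    simp only [List.foldl_cons, List.map_cons, extras]
    by_cases h : f c ∈ acc
    · simp [h, ih]
    · simp [h, ih (acc ++ [f c]), List.append_assoc]

theorem extras_eq_dedup_filter :
    ∀ (ys cur acc seen : List (Int × Int)),
      (∀ y, y ∈ acc ↔ y ∈ cur ∨ y ∈ seen) →
      extras acc ys = (pyDedup seen ys).filter (fun c => decide (c ∉ cur)) := by
  intro ys
  induction ys with
  | nil => intro cur acc seen _; simp [extras, pyDedup]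
  | cons y ys ih =>
    intro cur acc seen hinv
    simp only [extras, pyDedup]
    by_cases hseen : y ∈ seen
    · have hacc : y ∈ acc := (hinv y).mpr (Or.inr hseen)
      simp only [if_pos hacc, if_pos hseen]
      exact ih cur acc seen hinv
    · by_cases hacc : y ∈ acc
      · have hcur : y ∈ cur := by
          rcases (hinv y).mp hacc with h | h
          · exact h
          · exact absurd h hseen
        simp only [if_pos hacc, if_neg hseen, List.filter_cons]
        simp only [hcur, not_true_eq_false, decide_false]
        refine ih cur acc (y :: seen) ?_
        intro z
        constructor
        · intro hz
          rcases (hinv z).mp hz with h | h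
          · exact Or.inl h
          · exact Or.inr (List.mem_cons_of_mem _ h)
        · intro hz
          rcases hz with h | h
          · exact (hinv z).mpr (Or.inl h)
          · rcases List.mem_cons.mp h with rfl | h
            · exact hacc
            · exact (hinv z).mpr (Or.inr h)
      · have hcur : y ∉ cur := fun h => hacc ((hinv y).mpr (Or.inl h))
        simp only [if_neg hacc, if_neg hseen, List.filter_cons]
        simp only [hcur, not_false_eq_true, decide_true]
        refine congrArg (y :: ·) (ih cur (acc ++ [y]) (y :: seen) ?_)
        intro z
        have h := hinv z
        simp only [List.mem_append, List.mem_cons, List.not_mem_nil, or_false] at *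
        tauto

theorem stepA_eq_stepB (cur : List (Int × Int)) (dir : Bool) :
    cur.foldl (fun nl cell =>
        if (cell.1 + (if dir then -1 else 1), cell.2) ∈ nl then nl
        else nl ++ [(cell.1 + (if dir then -1 else 1), cell.2)]) cur
      = stepB cur dir := by
  have h := foldl_grow_eq_extras (fun c => (c.1 + (if dir then -1 else 1), c.2)) cur cur
  simp only [stepB]
  rw [h, extras_eq_dedup_filter _ cur cur []]
  intro y; simp

theorem thicken_eq_loopB :
    ∀ (n : Nat) (t : Int) (line : List (Int × Int)) (left : Bool),
      t.toNat = n → thicken line t left = loopB n line left := by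
  intro n
  induction n with
  | zero =>
    intro t line left ht
    rw [thicken]
    have : ¬ t > 0 := by omega
    simp [this, loopB]
  | succ n ih =>
    intro t line left ht
    rw [thicken]
    have hpos : t > 0 := by omega
    simp only [if_pos hpos]
    rw [stepA_eq_stepB line left]
    rw [ih (t - 1) _ _ (by omega)]
    rfl

-- ===== VERDICT (by name: the statement is the Claim_ definition above) =====
theorem thicken_spec : Claim_equal_thicken := by
  intro line thickness left _
  unfold Spec_thicken thicken_alt
  exact thicken_eq_loopB thickness.toNat thickness line left rfl
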